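-- pv_equiv track=rewrite | github.com/ahmedrazarais/LeetCode | largest-number-twice-others.py | dominantIndex
-- ===== SOURCE A (Python) =====
-- def dominantIndex(nums):
--         if len(nums) == 0:
--           return -1
--
--         # Step 1: Find the maximum value and its index
--         max_value = max(nums)
--         max_index = nums.index(max_value)
--
--         # Step 2: Verify the condition
--         for i, num in enumerate(nums):
--             if i != max_index and max_value < 2 * num:
--                 return -1
--
--         return max_index
-- ===== SOURCE B (Python) =====
-- def dominantIndex(nums):
--     if len(nums) == 0:
--         return -1
--     if len(nums) == 1:
--         return 0
--     if nums[0] < nums[1]: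
--         best, idx, second = nums[1], 1, nums[0]
--     else:
--         best, idx, second = nums[0], 0, nums[1]
--     for i in range(2, len(nums)):
--         v = nums[i]
--         if best < v:
--             best, idx, second = v, i, best
--         elif second < v:
--             second = v
--     return idx if 2 * second <= best else -1
-- ===== Notes on version B (the rewrite author's own statement) =====
-- stated objective: alternative
-- what changed: Replaced A's max()+index()+full verification loop (three passes) by a single pass that tracks the running maximum, its first index and the second maximum, finishing with the single comparison 2*second <= best.
import Mathlib
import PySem

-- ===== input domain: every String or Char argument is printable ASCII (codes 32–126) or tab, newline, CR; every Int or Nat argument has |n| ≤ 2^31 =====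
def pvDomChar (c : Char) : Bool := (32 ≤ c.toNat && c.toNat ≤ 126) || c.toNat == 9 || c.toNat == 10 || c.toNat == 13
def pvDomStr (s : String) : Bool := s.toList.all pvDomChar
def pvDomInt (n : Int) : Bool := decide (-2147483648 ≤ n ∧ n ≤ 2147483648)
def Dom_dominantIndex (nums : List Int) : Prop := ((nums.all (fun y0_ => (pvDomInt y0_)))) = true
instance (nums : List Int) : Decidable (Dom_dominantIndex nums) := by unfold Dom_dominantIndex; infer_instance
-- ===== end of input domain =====

-- B replaces A's three passes (max, index, verification loop) by one pass tracking
-- (best, first index of best, second maximum) and a final single comparison; alternative, not claimed faster.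

-- ===== PORT A =====
-- the for-loop over enumerate(nums) with early 'return -1'
def aCheck (maxVal maxIdx : Int) : List (Int × Int) → Int
  | [] => maxIdx
  | (i, num) :: rest =>
    if i ≠ maxIdx ∧ maxVal < 2 * num then -1 else aCheck maxVal maxIdx rest

def dominantIndex (nums : List Int) : Int :=
  if nums.length = 0 then -1
  else
    match PySem.List.max? nums (fun y => y) with
    | none => -1          -- unreachable: nums is nonempty here
    | some maxVal =>
      match PySem.List.index? nums maxVal with
      | none => -1        -- unreachable: maxVal ∈ nums
      | some maxIdx => aCheck maxVal (Int.ofNat maxIdx) (PySem.List.enumerate nums 0)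

-- ===== PORT B =====
-- the single pass of Source B: state (best, idx, second), i the index of the next element
def bLoop (best idx second i : Int) : List Int → Int × Int × Int
  | [] => (best, idx, second)
  | v :: rest =>
    if best < v then bLoop v i best (i + 1) rest
    else if second < v then bLoop best idx v (i + 1) rest
    else bLoop best idx second (i + 1) rest

def dominantIndex_alt : List Int → Int
  | [] => -1
  | [_] => 0
  | x :: y :: rest =>
    let s := if x < y then bLoop y 1 x 2 rest else bLoop x 0 y 2 rest
    if 2 * s.2.2 ≤ s.1 then s.2.1 else -1

-- ===== PRECONDITION & SPEC =====
def Spec_dominantIndex (nums : List Int) (out : Int) : Prop := out = dominantIndex_alt nums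
instance (nums : List Int) (out : Int) : Decidable (Spec_dominantIndex nums out) := by unfold Spec_dominantIndex; infer_instance

-- ===== CLAIM (what is proved, stated in full; the proofs are below) =====
def Claim_equal_dominantIndex : Prop := ∀ (nums : List Int), Dom_dominantIndex nums → Spec_dominantIndex nums (dominantIndex nums)

-- ===== LEMMAS AND PROOFS =====

-- invariant of B's loop after the prefix p has been processed:
-- best is the maximum of p, idx its first index, second the maximum over the other positions
def pvInv (p : List Int) (best : Int) (idx : Nat) (second : Int) : Prop :=
  (∀ v ∈ p, v ≤ best) ∧
  p.idxOf best = idx ∧ best ∈ p ∧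
  second ≤ best ∧
  (∃ j, ∃ h : j < p.length, j ≠ idx ∧ p[j] = second) ∧
  (∀ j, ∀ h : j < p.length, j ≠ idx → p[j] ≤ second)

theorem inv_step (p : List Int) (best : Int) (idx : Nat) (second v : Int)
    (h : pvInv p best idx second) :
    pvInv (p ++ [v])
      (if best < v then v else best)
      (if best < v then p.length else idx)
      (if best < v then best else if second < v then v else second) := by
  obtain ⟨hub, hidx, hmem, hsb, ⟨j, hj, hjne, hjval⟩, hdom⟩ := h
  subst hidx
  have hidxlt : List.idxOf best p < p.length := List.idxOf_lt_length_of_mem hmem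
  have hatidx : p[List.idxOf best p] = best := List.getElem_idxOf hidxlt
  by_cases hbv : best < v
  · simp only [if_pos hbv]
    refine ⟨?_, ?_, by simp, le_of_lt hbv, ?_, ?_⟩
    · intro w hw
      rcases List.mem_append.1 hw with hw | hw
      · exact le_of_lt (lt_of_le_of_lt (hub w hw) hbv)
      · simp at hw; omega
    · have hnotin : v ∉ p := fun hin => absurd (hub v hin) (not_le.2 hbv)
      rw [List.idxOf_append_of_notMem hnotin]; simp
    · refine ⟨List.idxOf best p, by simp; omega, by omega, ?_⟩
      rw [List.getElem_append_left hidxlt]; exact hatidx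
    · intro k hk hkne
      have hk' : k < p.length := by simp at hk; omega
      rw [List.getElem_append_left hk']
      exact hub _ (List.getElem_mem hk')
  · simp only [if_neg hbv]
    have hvb : v ≤ best := not_lt.1 hbv
    have hidx' : (p ++ [v]).idxOf best = p.idxOf best := List.idxOf_append_of_mem hmem
    have hub' : ∀ w ∈ p ++ [v], w ≤ best := by
      intro w hw; rcases List.mem_append.1 hw with hw | hw
      · exact hub w hw
      · simp at hw; omega
    have hmem' : best ∈ p ++ [v] := List.mem_append_left _ hmem
    by_cases hsv : second < v
    · simp only [if_pos hsv]
      refine ⟨hub', hidx', hmem', hvb, ?_, ?_⟩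
      · exact ⟨p.length, by simp, by omega, by simp⟩
      · intro k hk hkne
        by_cases hk' : k < p.length
        · rw [List.getElem_append_left hk']
          exact le_of_lt (lt_of_le_of_lt (hdom k hk' hkne) hsv)
        · have : k = p.length := by simp at hk; omega
          subst this; simp
    · simp only [if_neg hsv]
      refine ⟨hub', hidx', hmem', hsb, ?_, ?_⟩
      · exact ⟨j, by simp; omega, hjne, by rw [List.getElem_append_left hj]; exact hjval⟩
      · intro k hk hkne
        by_cases hk' : k < p.length
        · rw [List.getElem_append_left hk']; exact hdom k hk' hkne
        · have : k = p.length := by simp at hk; omega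
          subst this; simp; omega

theorem bLoop_inv (r : List Int) : ∀ (p : List Int) (best : Int) (idx : Nat) (second : Int),
    pvInv p best idx second →
    ∃ (B : Int) (I : Nat) (S : Int),
      bLoop best (Int.ofNat idx) second (Int.ofNat p.length) r = (B, Int.ofNat I, S) ∧
      pvInv (p ++ r) B I S := by
  induction r with
  | nil => intro p best idx second h; exact ⟨best, idx, second, rfl, by simpa using h⟩
  | cons v r ih =>
    intro p best idx second h
    have hstep := inv_step p best idx second v h
    by_cases hbv : best < v
    · simp only [if_pos hbv] at hstep
      obtain ⟨B, I, S, heq, hinv⟩ := ih (p ++ [v]) v p.length best hstep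
      refine ⟨B, I, S, ?_, by simpa using hinv⟩
      rw [bLoop, if_pos hbv]
      rw [show (Int.ofNat p.length + 1) = Int.ofNat (p ++ [v]).length by simp] at *
      exact heq
    · simp only [if_neg hbv] at hstep
      by_cases hsv : second < v
      · simp only [if_pos hsv] at hstep
        obtain ⟨B, I, S, heq, hinv⟩ := ih (p ++ [v]) best idx v hstep
        refine ⟨B, I, S, ?_, by simpa using hinv⟩
        rw [bLoop, if_neg hbv, if_pos hsv]
        rw [show (Int.ofNat p.length + 1) = Int.ofNat (p ++ [v]).length by simp] at *
        exact heq
      · simp only [if_neg hsv] at hstep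
        obtain ⟨B, I, S, heq, hinv⟩ := ih (p ++ [v]) best idx second hstep
        refine ⟨B, I, S, ?_, by simpa using hinv⟩
        rw [bLoop, if_neg hbv, if_neg hsv]
        rw [show (Int.ofNat p.length + 1) = Int.ofNat (p ++ [v]).length by simp] at *
        exact heq

-- A's verification loop as an all-quantifier
theorem aCheck_char (maxVal maxIdx : Int) (l : List (Int × Int)) :
    aCheck maxVal maxIdx l =
      if ∀ p ∈ l, p.1 ≠ maxIdx → 2 * p.2 ≤ maxVal then maxIdx else -1 := by
  induction l with
  | nil => simp [aCheck]
  | cons q t ih =>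
    obtain ⟨i, num⟩ := q
    rw [aCheck]
    by_cases hfail : i ≠ maxIdx ∧ maxVal < 2 * num
    · rw [if_pos hfail]
      rw [if_neg]
      intro hall
      have := hall (i, num) (by simp) hfail.1
      omega
    · rw [if_neg hfail, ih]
      by_cases hall : ∀ p ∈ t, p.1 ≠ maxIdx → 2 * p.2 ≤ maxVal
      · rw [if_pos hall, if_pos]
        intro p hp hne
        rcases List.mem_cons.1 hp with hp | hp
        · subst hp; simp at hne; omega
        · exact hall p hp hne
      · rw [if_neg hall, if_neg]
        intro h; exact hall fun p hp => h p (List.mem_cons_of_mem _ hp)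

-- ===== VERDICT (by name: the statement is the Claim_ definition above) =====
theorem dominantIndex_spec : Claim_equal_dominantIndex := by
  intro nums _
  unfold Spec_dominantIndex
  match nums with
  | [] => rfl
  | [x] =>
    simp [dominantIndex, dominantIndex_alt, PySem.List.max?_id_cons,
      PySem.List.index?_eq_idxOf?, List.idxOf?, PySem.List.enumerate, aCheck]
  | x :: y :: rest =>
    -- B's side via the loop invariant
    have hinit : if x < y then pvInv [x, y] y 1 x else pvInv [x, y] x 0 y := by
      by_cases hxy : x < y
      · rw [if_pos hxy]
        refine ⟨?_, ?_, by simp, le_of_lt hxy, ⟨0, by simp, by simp, by simp⟩, ?_⟩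
        · intro v hv; simp at hv; rcases hv with h | h <;> omega
        · rw [List.idxOf_cons_ne _ (by exact fun h => by omega)]; simp
        · intro j hj hjne
          simp only [List.length_cons, List.length_nil] at hj
          have hj0 : j = 0 := by omega
          subst hj0; simp
      · rw [if_neg hxy]
        refine ⟨?_, by simp, by simp, by omega, ⟨1, by simp, by simp, by simp⟩, ?_⟩
        · intro v hv; simp at hv; rcases hv with h | h <;> omega
        · intro j hj hjne
          simp only [List.length_cons, List.length_nil] at hj
          have hj1 : j = 1 := by omega
          subst hj1; simp
    have hmain : ∃ (B : Int) (I : Nat) (S : Int),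
        (if x < y then bLoop y 1 x 2 rest else bLoop x 0 y 2 rest) = (B, Int.ofNat I, S) ∧
        pvInv (x :: y :: rest) B I S := by
      by_cases hxy : x < y
      · rw [if_pos hxy] at hinit ⊢
        have := bLoop_inv rest [x, y] y 1 x hinit
        simpa using this
      · rw [if_neg hxy] at hinit ⊢
        have := bLoop_inv rest [x, y] x 0 y hinit
        simpa using this
    obtain ⟨B, I, S, hloop, hub, hidx, hmem, hsb, ⟨j, hj, hjne, hjval⟩, hdom⟩ := hmain
    -- A's side: max? and index? give exactly B and I
    have hne : (x :: y :: rest).length ≠ 0 := by simp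
    have hmax : PySem.List.max? (x :: y :: rest) (fun y => y) = some B := by
      rcases hmx : PySem.List.max? (x :: y :: rest) (fun y => y) with _ | m
      · exact absurd ((PySem.List.max?_eq_none_iff _ _).1 hmx) (by simp)
      · have h1 : m ≤ B := hub m (PySem.List.max?_mem hmx)
        have h2 : B ≤ m := PySem.List.max?_isMax hmx B hmem
        congr 1; omega
    have hidxeq : PySem.List.index? (x :: y :: rest) B = some I := by
      have hsome : (PySem.List.index? (x :: y :: rest) B).isSome :=
        (PySem.List.index?_isSome_iff _ _).2 hmem
      obtain ⟨k, hk⟩ := Option.isSome_iff_exists.1 hsome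
      have hk' := hk
      rw [PySem.List.index?_eq_idxOf?] at hk'
      have : List.idxOf B (x :: y :: rest) = k := by
        rw [List.idxOf_eq_getD_idxOf?, hk']; rfl
      rw [hk]; rw [hidx] at this; rw [this]
    rw [dominantIndex, if_neg hne]
    simp only [hmax, hidxeq, aCheck_char]
    simp only [dominantIndex_alt, hloop]
    -- the two verdicts agree
    have hiff : (∀ p ∈ PySem.List.enumerate (x :: y :: rest) 0,
        p.1 ≠ Int.ofNat I → 2 * p.2 ≤ B) ↔ 2 * S ≤ B := by
      constructor
      · intro h
        have := h (Int.ofNat j, (x :: y :: rest)[j])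
          (by rw [PySem.List.mem_enumerate_iff]; exact ⟨j, hj, by simp⟩)
          (by simp; omega)
        rw [hjval] at this; exact this
      · intro h p hp hpne
        rw [PySem.List.mem_enumerate_iff] at hp
        obtain ⟨k, hk, hpeq⟩ := hp
        subst hpeq
        simp only [zero_add] at hpne ⊢
        have hkne : k ≠ I := by intro h; exact hpne (by simp [h])
        have := hdom k hk hkne
        omega
    by_cases hc : 2 * S ≤ B
    · rw [if_pos (hiff.2 hc)]
      simp only [if_pos hc]
    · rw [if_neg (fun h => hc (hiff.1 h))]
      simp only [if_neg hc]
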